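-- pv_equiv track=rewrite | github.com/michalinajnk/Book_Genre_Classification | main.py | _get_all_genres
-- ===== SOURCE A (Python) =====
-- def _get_all_genres(genres):
-- 	gen = []
-- 	almost_book_genres = genres.split(": ")
-- 	for genre in almost_book_genres:
-- 		g = genre.split(", ")
-- 		for word in g:
-- 			word = word.replace('"', "")
-- 			word = word.replace('}', "")
-- 			word = word.replace('{', "")
-- 			if word.isalpha():
-- 				gen.append(word.strip())
-- 	return gen
-- ===== SOURCE B (Python) =====
-- def _get_all_genres(genres):
-- 	# one left-to-right scan: cut at every ": " or ", " occurrence (they can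
-- 	# never overlap), clean and test each token as it is completed
-- 	gen = []
-- 	tok = []
-- 	i = 0
-- 	n = len(genres)
-- 	while i < n:
-- 		c = genres[i]
-- 		if (c == ':' or c == ',') and i + 1 < n and genres[i + 1] == ' ':
-- 			word = ''.join(ch for ch in tok if ch not in '"{}')
-- 			if word.isalpha():
-- 				gen.append(word)
-- 			tok = []
-- 			i += 2
-- 		else:
-- 			tok.append(c)
-- 			i += 1
-- 	word = ''.join(ch for ch in tok if ch not in '"{}')
-- 	if word.isalpha():
-- 		gen.append(word)
-- 	return gen
-- ===== Notes on version B (the rewrite author's own statement) =====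
-- stated objective: alternative
-- what changed: Replaces A's two-level nested split-and-loop (outer split on colon-space, inner split on comma-space) with a single left-to-right character scan that cuts a token at every colon-space or comma-space occurrence and cleans/tests each token as it is completed.
import Mathlib
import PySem

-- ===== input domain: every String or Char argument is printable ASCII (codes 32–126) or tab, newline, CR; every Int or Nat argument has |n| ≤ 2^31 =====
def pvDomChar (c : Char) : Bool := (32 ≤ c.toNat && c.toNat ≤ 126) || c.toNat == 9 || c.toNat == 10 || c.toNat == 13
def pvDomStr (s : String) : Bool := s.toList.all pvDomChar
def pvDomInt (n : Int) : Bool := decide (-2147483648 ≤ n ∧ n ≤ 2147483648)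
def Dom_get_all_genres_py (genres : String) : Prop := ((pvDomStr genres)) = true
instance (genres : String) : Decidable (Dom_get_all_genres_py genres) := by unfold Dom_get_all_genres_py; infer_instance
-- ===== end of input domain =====

-- B replaces A's nested colon-space-then-comma-space split loops by one left-to-right
-- character scan that cuts a token at every two-character separator occurrence (objective: alternative).

-- ===== PORT A =====
-- literal transliteration of A: split on ": ", inner split on ", ", three replaces, isalpha, append strip
def get_all_genres_py (genres : String) : List String :=
  let almost_book_genres := PySem.Chars.splitOn genres.toList [':', ' ']
  almost_book_genres.foldl (fun gen genre =>
    let g := PySem.Chars.splitOn genre [',', ' ']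
    g.foldl (fun gen word =>
      let word1 := PySem.Chars.replace word ['"'] []
      let word2 := PySem.Chars.replace word1 ['}'] []
      let word3 := PySem.Chars.replace word2 ['{'] []
      if PySem.Chars.strIsalpha word3 then gen ++ [String.ofList (PySem.Chars.strip word3)] else gen) gen) []

-- ===== PORT B =====
-- Source B: ''.join(ch for ch in tok if ch not in '"{}')
def pvClean (tok : List Char) : List Char :=
  tok.filter (fun ch => !(ch == '"' || ch == '{' || ch == '}'))

-- Source B: clean the finished token, test isalpha, append
def pvEmit (gen : List String) (tok : List Char) : List String :=
  let word := pvClean tok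
  if PySem.Chars.strIsalpha word then gen ++ [String.ofList word] else gen

-- Source B's while loop: one pass; cut a token at ':' or ',' followed by ' ', else grow it
def pvScan (gen : List String) (tok : List Char) : List Char → List String
  | [] => pvEmit gen tok
  | c :: cs =>
    if (c = ':' ∨ c = ',') ∧ cs.head? = some ' ' then pvScan (pvEmit gen tok) [] cs.tail
    else pvScan gen (tok ++ [c]) cs
termination_by l => l.length
decreasing_by
  all_goals simp [List.length_tail]
  all_goals omega

def get_all_genres_py_alt (genres : String) : List String :=
  pvScan [] [] genres.toList

-- ===== PRECONDITION & SPEC =====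
def Spec_get_all_genres_py (genres : String) (out : List String) : Prop := out = get_all_genres_py_alt genres
instance (genres : String) (out : List String) : Decidable (Spec_get_all_genres_py genres out) := by unfold Spec_get_all_genres_py; infer_instance

-- ===== CLAIM (what is proved, stated in full; the proofs are below) =====
def Claim_equal_get_all_genres_py : Prop := ∀ (genres : String), Dom_get_all_genres_py genres → Spec_get_all_genres_py genres (get_all_genres_py genres)

-- ===== LEMMAS AND PROOFS =====

-- reference splitter for a 2-character separator [a, b]
def splitR2 (a b : Char) : List Char → List (List Char)
  | [] => [[]]
  | [c] => [[c]]
  | c :: d :: t =>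
    if c = a ∧ d = b then [] :: splitR2 a b t
    else (splitR2 a b (d :: t)).modifyHead (c :: ·)

theorem splitR2_ne_nil (a b : Char) : ∀ (l : List Char), splitR2 a b l ≠ [] := by
  intro l
  fun_induction splitR2 a b l with
  | case1 => simp [splitR2]
  | case2 => simp [splitR2]
  | case3 c d t h ih => simp [splitR2, h]
  | case4 c d t h ih =>
    cases hs : splitR2 a b (d :: t) with
    | nil => exact absurd hs ih
    | cons s0 S => simp [splitR2, h, hs]

theorem splitR2_cons (a b c : Char) (t : List Char) (h : ¬(c = a ∧ t.head? = some b)) :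
    splitR2 a b (c :: t) = (splitR2 a b t).modifyHead (c :: ·) := by
  cases t with
  | nil => simp [splitR2]
  | cons d t' =>
    have : ¬(c = a ∧ d = b) := by simpa using h
    simp [splitR2, this]

theorem pvModifyHead_triv {α : Type} (L : List α) : L.modifyHead (fun x => x) = L := by
  cases L <;> simp

theorem modifyHead_append_left {α : Type} (f : α → α) (l r : List α) (h : l ≠ []) :
    (l ++ r).modifyHead f = l.modifyHead f ++ r := by
  cases l with
  | nil => exact absurd rfl h
  | cons x xs => simp

-- splitOn.go with enough fuel computes splitR2
theorem splitOn_go_spec (a b : Char) :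
    ∀ (fuel : Nat) (l cur : List Char) (acc : List (List Char)), l.length < fuel →
      PySem.Chars.splitOn.go [a, b] fuel l cur acc
        = acc.reverse ++ (splitR2 a b l).modifyHead (cur.reverse ++ ·) := by
  intro fuel
  induction fuel with
  | zero => intro l cur acc h; omega
  | succ fuel ih =>
    intro l cur acc h
    cases l with
    | nil => simp [PySem.Chars.splitOn.go, splitR2]
    | cons c rest =>
      cases rest with
      | nil =>
        have hp : [a, b].isPrefixOf [c] = false := by simp [List.isPrefixOf]
        cases fuel with
        | zero => simp at h
        | succ f => simp [PySem.Chars.splitOn.go, hp, splitR2]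
      | cons d r' =>
        by_cases hab : a = c ∧ b = d
        · obtain ⟨rfl, rfl⟩ := hab
          have hp : [a, b].isPrefixOf (a :: b :: r') = true := by simp [List.isPrefixOf]
          have hr : r'.length < fuel := by simp at h; omega
          have hd : List.drop [a, b].length (a :: b :: r') = r' := rfl
          simp only [PySem.Chars.splitOn.go, hp, if_true, hd]
          rw [ih r' [] (cur.reverse :: acc) hr]
          simp [splitR2, pvModifyHead_triv]
        · have hp : [a, b].isPrefixOf (c :: d :: r') = false := by
            simp [List.isPrefixOf]
            intro h1 h2
            exact absurd ⟨h1, h2⟩ hab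
          have hr : (d :: r').length < fuel := by simp at h ⊢; omega
          simp only [PySem.Chars.splitOn.go, hp, if_false]
          rw [ih (d :: r') (c :: cur) acc hr]
          have hne : ¬(c = a ∧ d = b) := fun ⟨x, y⟩ => hab ⟨x.symm, y.symm⟩
          simp [splitR2, hne, List.modifyHead_modifyHead, Function.comp_def]

theorem splitOn_eq_splitR2 (a b : Char) (l : List Char) :
    PySem.Chars.splitOn l [a, b] = splitR2 a b l := by
  have h := splitOn_go_spec a b (l.length + 1) l [] [] (by omega)
  rw [PySem.Chars.splitOn, h]
  cases hs : splitR2 a b l <;> simp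

-- the token list B's scan cuts out of the input
def pvTokens : List Char → List (List Char)
  | [] => [[]]
  | c :: cs =>
    if (c = ':' ∨ c = ',') ∧ cs.head? = some ' ' then [] :: pvTokens cs.tail
    else (pvTokens cs).modifyHead (c :: ·)
termination_by l => l.length
decreasing_by
  all_goals simp [List.length_tail]
  all_goals omega

-- the accepted words among a token list
def pvOut (ts : List (List Char)) : List String :=
  (ts.filter (fun t => PySem.Chars.strIsalpha (pvClean t))).map (fun t => String.ofList (pvClean t))

theorem pvOut_cons (t : List Char) (ts : List (List Char)) :
    pvOut (t :: ts)
      = (if PySem.Chars.strIsalpha (pvClean t) then [String.ofList (pvClean t)] else []) ++ pvOut ts := by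
  by_cases h : PySem.Chars.strIsalpha (pvClean t) <;> simp [pvOut, h]

theorem pvScan_eq (l : List Char) (gen : List String) (tok : List Char) :
    pvScan gen tok l = gen ++ pvOut ((pvTokens l).modifyHead (tok ++ ·)) := by
  fun_induction pvScan gen tok l with
  | case1 gen tok =>
    by_cases h : PySem.Chars.strIsalpha (pvClean tok) <;>
      simp [pvEmit, pvTokens, pvOut, h]
  | case2 gen tok c cs h ih =>
    rw [ih]
    simp only [pvTokens, h, if_true, List.modifyHead_cons, pvOut_cons, pvModifyHead_triv,
      List.append_nil]
    by_cases ha : PySem.Chars.strIsalpha (pvClean tok) <;>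
      simp [pvEmit, ha, pvOut_cons, pvModifyHead_triv]
  | case3 gen tok c cs h ih =>
    rw [ih]
    have hf : (fun x : List Char => (tok ++ [c]) ++ x) = (fun x : List Char => tok ++ (c :: x)) := by
      funext x; simp
    simp only [pvTokens, h, if_false, List.modifyHead_modifyHead, Function.comp_def, hf]

-- first piece of splitR2 starts like the input (or is empty)
theorem splitR2_head (a b : Char) (cs s0 : List Char) (S' : List (List Char))
    (hs : splitR2 a b cs = s0 :: S') : s0 = [] ∨ s0.head? = cs.head? := by
  cases cs with
  | nil => simp [splitR2] at hs; left; exact hs.1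
  | cons c t =>
    cases t with
    | nil =>
      simp [splitR2] at hs
      right; rw [← hs.1]
    | cons d t' =>
      by_cases hab : c = a ∧ d = b
      · simp [splitR2, hab] at hs
        left; exact hs.1
      · simp only [splitR2, hab, if_false] at hs
        cases hi : splitR2 a b (d :: t') with
        | nil => exact absurd hi (splitR2_ne_nil a b _)
        | cons u U =>
          rw [hi] at hs
          simp at hs
          right; rw [← hs.1]
          simp

-- B's tokenization is exactly A's nested split
theorem pvTokens_eq_flatMap (l : List Char) :
    pvTokens l = (splitR2 ':' ' ' l).flatMap (splitR2 ',' ' ') := by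
  fun_induction pvTokens l with
  | case1 => simp [splitR2]
  | case2 c cs h ih =>
    obtain ⟨hc, hsp⟩ := h
    obtain ⟨t, rfl⟩ : ∃ t, cs = ' ' :: t := by
      cases cs with
      | nil => simp at hsp
      | cons x xs => simp at hsp; exact ⟨xs, by rw [hsp]⟩
    rcases hc with rfl | rfl
    · simp only [splitR2, and_self, if_true, List.flatMap_cons]
      rw [ih]
      simp [splitR2]
    · have h1 : splitR2 ':' ' ' (',' :: ' ' :: t)
          = ((splitR2 ':' ' ' t).modifyHead (' ' :: ·)).modifyHead (',' :: ·) := by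
        rw [splitR2_cons ':' ' ' ',' _ (by simp), splitR2_cons ':' ' ' ' ' _ (by simp)]
      simp only [List.tail_cons] at ih ⊢
      cases hs : splitR2 ':' ' ' t with
      | nil => exact absurd hs (splitR2_ne_nil _ _ _)
      | cons s0 S' =>
        rw [ih, h1, hs]
        simp only [List.modifyHead_cons, List.flatMap_cons]
        have h2 : splitR2 ',' ' ' (',' :: ' ' :: s0) = [] :: splitR2 ',' ' ' s0 := by
          simp [splitR2]
        rw [h2]
        simp
  | case3 c cs h ih =>
    have h1 : splitR2 ':' ' ' (c :: cs) = (splitR2 ':' ' ' cs).modifyHead (c :: ·) := by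
      refine splitR2_cons ':' ' ' c cs (fun hx => h ⟨Or.inl hx.1, hx.2⟩)
    cases hs : splitR2 ':' ' ' cs with
    | nil => exact absurd hs (splitR2_ne_nil _ _ _)
    | cons s0 S' =>
      rw [h1, hs, ih, hs]
      simp only [List.modifyHead_cons, List.flatMap_cons]
      have hns : ¬(c = ',' ∧ s0.head? = some ' ') := by
        rintro ⟨rfl, hh⟩
        rcases splitR2_head ':' ' ' cs s0 S' hs with rfl | he
        · simp at hh
        · exact h ⟨Or.inr rfl, by rw [← he]; exact hh⟩
      rw [splitR2_cons ',' ' ' c s0 hns]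
      rw [modifyHead_append_left _ _ _ (splitR2_ne_nil ',' ' ' s0)]

-- replacing one character by "" is a filter
theorem replace_go_filter (d : Char) :
    ∀ (fuel : Nat) (l acc : List Char), l.length ≤ fuel →
      PySem.Chars.replace.go [d] [] fuel l acc = acc.reverse ++ l.filter (fun c => !(c == d)) := by
  intro fuel
  induction fuel with
  | zero =>
    intro l acc h
    cases l with
    | nil => simp [PySem.Chars.replace.go]
    | cons c t => simp at h
  | succ fuel ih =>
    intro l acc h
    cases l with
    | nil => simp [PySem.Chars.replace.go]
    | cons c t =>
      have hlen : t.length ≤ fuel := by simp at h; omega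
      by_cases hd : d = c
      · subst hd
        have hp : [d].isPrefixOf (d :: t) = true := by simp [List.isPrefixOf]
        have hdrop : List.drop [d].length (d :: t) = t := rfl
        simp only [PySem.Chars.replace.go, hp, if_true, hdrop, List.reverse_nil,
          List.nil_append]
        rw [ih t acc hlen]
        simp [List.filter_cons]
      · have hp : [d].isPrefixOf (c :: t) = false := by
          simp [List.isPrefixOf]
          exact fun hx => absurd hx hd
        have hcd : (c == d) = false := by
          simp only [beq_eq_false_iff_ne, ne_eq]
          exact fun hx => hd hx.symm
        simp only [PySem.Chars.replace.go, hp, if_false]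
        rw [ih t (c :: acc) hlen]
        simp [List.filter_cons, hcd]

theorem replace_single_filter (d : Char) (l : List Char) :
    PySem.Chars.replace l [d] [] = l.filter (fun c => !(c == d)) := by
  rw [PySem.Chars.replace]
  simp only [List.isEmpty_cons, if_false, Bool.false_eq_true]
  exact replace_go_filter d l.length l [] (le_refl _)

-- A's three replaces are B's one filter
theorem replace_chain_eq_pvClean (w : List Char) :
    PySem.Chars.replace (PySem.Chars.replace (PySem.Chars.replace w ['"'] []) ['}'] []) ['{'] []
      = pvClean w := by
  simp only [replace_single_filter, List.filter_filter, pvClean]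
  refine List.filter_congr ?_
  intro c _
  cases h1 : c == '"' <;> cases h2 : c == '{' <;> cases h3 : c == '}' <;> simp [h1, h2, h3]

-- a character between two printable non-space bounds is not whitespace
theorem pvSpaceFalse (c : Char) (lo hi : Char) (nlo nhi : Nat)
    (h1 : lo ≤ c) (h2 : c ≤ hi) (e1 : lo.toNat = nlo) (e2 : hi.toNat = nhi)
    (hb : 33 ≤ nlo) (hb2 : nhi ≤ 126) : PySem.Chars.isspace c = false := by
  rw [Char.le_def, UInt32.le_iff_toNat_le] at h1 h2
  have hv : c.toNat = c.val.toNat := rfl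
  rw [PySem.Chars.isspace]
  simp only [decide_eq_false_iff_not, Bool.or_eq_false_iff, Bool.and_eq_false_iff,
    decide_eq_false_iff_not, not_le, hv]
  change lo.toNat ≤ _ at h1
  change _ ≤ hi.toNat at h2
  rw [e1] at h1; rw [e2] at h2
  omega

-- an all-alphabetic word has nothing to strip
theorem strip_of_isalpha (w : List Char) (h : PySem.Chars.strIsalpha w = true) :
    PySem.Chars.strip w = w := by
  have halpha : ∀ c ∈ w, PySem.Chars.isspace c = false := by
    intro c hc
    have ha : PySem.Chars.isalpha c = true := by
      rw [PySem.Chars.strIsalpha, Bool.and_eq_true] at h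
      exact (List.all_eq_true.mp h.2) c hc
    rw [PySem.Chars.isalpha, PySem.Chars.isupper, PySem.Chars.islower] at ha
    simp only [Bool.or_eq_true, Bool.and_eq_true, decide_eq_true_eq] at ha
    rcases ha with ⟨h1, h2⟩ | ⟨h1, h2⟩
    · exact pvSpaceFalse c 'A' 'Z' 65 90 h1 h2 rfl rfl (by omega) (by omega)
    · exact pvSpaceFalse c 'a' 'z' 97 122 h1 h2 rfl rfl (by omega) (by omega)
  have hl : PySem.Chars.lstrip w = w := by
    rw [PySem.Chars.lstrip, List.dropWhile_eq_self_iff]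
    intro hl0
    simp [halpha _ (List.getElem_mem hl0)]
  have hr : List.dropWhile PySem.Chars.isspace w.reverse = w.reverse := by
    rw [List.dropWhile_eq_self_iff]
    intro hl0
    have hm : w.reverse[0] ∈ w := List.mem_reverse.mp (List.getElem_mem hl0)
    rw [halpha _ hm]
    simp
  rw [PySem.Chars.strip, hl, PySem.Chars.rstrip, hr, List.reverse_reverse]

-- a fold of folds is a fold of the flattened list
theorem foldl_foldl_flatMap {α β γ : Type} (f : α → List β) (step : γ → β → γ) :
    ∀ (L : List α) (init : γ),
      L.foldl (fun acc x => (f x).foldl step acc) init = (L.flatMap f).foldl step init := by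
  intro L
  induction L with
  | nil => intro init; simp
  | cons x xs ih => intro init; simp [List.foldl_append, ih]

-- A's loop body, after the replace-chain and strip are simplified away
theorem pvStep_eq (gen : List String) (w : List Char) :
    (if PySem.Chars.strIsalpha
          (PySem.Chars.replace (PySem.Chars.replace (PySem.Chars.replace w ['"'] []) ['}'] []) ['{'] [])
        then gen ++ [String.ofList (PySem.Chars.strip
          (PySem.Chars.replace (PySem.Chars.replace (PySem.Chars.replace w ['"'] []) ['}'] []) ['{'] []))]
        else gen)
      = if PySem.Chars.strIsalpha (pvClean w) then gen ++ [String.ofList (pvClean w)] else gen := by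
  rw [replace_chain_eq_pvClean]
  by_cases h : PySem.Chars.strIsalpha (pvClean w) = true
  · simp [h, strip_of_isalpha _ h]
  · simp [h]

theorem a_eq_pvOut (genres : String) :
    get_all_genres_py genres
      = pvOut ((splitR2 ':' ' ' genres.toList).flatMap (splitR2 ',' ' ')) := by
  rw [get_all_genres_py]
  simp only [splitOn_eq_splitR2]
  rw [foldl_foldl_flatMap]
  rw [List.foldl_ext _ _ _ (fun gen w _ => pvStep_eq gen w)]
  rw [PySem.List.foldl_append_if]
  simp [pvOut]

theorem b_eq_pvOut (genres : String) :
    get_all_genres_py_alt genres = pvOut (pvTokens genres.toList) := by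
  rw [get_all_genres_py_alt, pvScan_eq]
  simp [pvModifyHead_triv]

-- ===== VERDICT (by name: the statement is the Claim_ definition above) =====
theorem get_all_genres_py_spec : Claim_equal_get_all_genres_py := by
  intro genres _
  show get_all_genres_py genres = get_all_genres_py_alt genres
  rw [a_eq_pvOut, b_eq_pvOut, pvTokens_eq_flatMap]
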